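-- pv_equiv track=rewrite | github.com/sidb95/code-problems | hackerrank/practice/short-palindrome.py | shortPalindrome
-- ===== SOURCE A (Python) =====
-- def shortPalindrome(s):
--     n = len(s)
--     count = 0
--     for i in range(0, n - 3):
--         j = i + 3
--         while ((j < n) and (s[i] != s[j])):
--             j += 1
--         if (j == n):
--             break
--         else:
--             for l1 in range(j - 1, i + 1, -1):
--                 k = i + 1
--                 while (k < l1):
--                     if (s[k] == s[l1]):
--                         count += 1
--                     k += 1
--                     #
--                 #
--             #
--         #
--     #
--     return count % (1000000007)
-- ===== SOURCE B (Python) =====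
-- def shortPalindrome(s):
--     n = len(s)
--     total = 0
--     for i in range(n - 3):
--         j = s.find(s[i], i + 3)
--         if j < 0:
--             break
--         cnt = {}
--         for c in s[i + 1:j]:
--             total += cnt.get(c, 0)
--             cnt[c] = cnt.get(c, 0) + 1
--     return total % 1000000007
-- ===== Notes on version B (the rewrite author's own statement) =====
-- stated objective: faster
-- what changed: A's hand-written linear first-match scan becomes str.find and its nested (l1,k) per-window pair scans become a single counter-dict pass over each window (adding, for each char, how many equal chars were already seen), keeping the same per-start-index break behaviour.
import Mathlib
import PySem

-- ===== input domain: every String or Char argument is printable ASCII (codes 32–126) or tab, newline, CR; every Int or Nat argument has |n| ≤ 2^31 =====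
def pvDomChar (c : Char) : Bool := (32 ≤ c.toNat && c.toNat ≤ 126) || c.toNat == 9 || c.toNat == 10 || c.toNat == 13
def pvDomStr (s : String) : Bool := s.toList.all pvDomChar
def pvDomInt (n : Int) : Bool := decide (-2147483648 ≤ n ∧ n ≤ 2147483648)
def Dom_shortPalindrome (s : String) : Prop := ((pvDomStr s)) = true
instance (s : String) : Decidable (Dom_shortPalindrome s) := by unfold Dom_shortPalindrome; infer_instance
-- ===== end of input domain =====

-- B replaces A's per-start nested (l1,k) scans by one counter pass over each window and
-- A's hand-written first-match scan by str.find; objective: faster.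

-- ===== PORT A =====
-- while ((j < n) and (s[i] != s[j])): j += 1
def pvFindJ (cs : List Char) (c : Char) (j : Nat) : Nat :=
  if j < cs.length then
    if cs.getD j ' ' ≠ c then pvFindJ cs c (j + 1) else j
  else j
termination_by cs.length - j

-- while (k < l1): if (s[k] == s[l1]): count += 1 ; k += 1
def pvKLoop (cs : List Char) (l1 k : Nat) (count : Int) : Int :=
  if k < l1 then
    pvKLoop cs l1 (k + 1) (if cs.getD k ' ' = cs.getD l1 ' ' then count + 1 else count)
  else count
termination_by l1 - k

-- for l1 in range(j - 1, i + 1, -1): …   (called with l1 = j - 1)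
def pvL1Loop (cs : List Char) (i l1 : Nat) (count : Int) : Int :=
  if i + 1 < l1 then pvL1Loop cs i (l1 - 1) (pvKLoop cs l1 (i + 1) count) else count
termination_by l1

-- for i in range(0, n - 3): …  with the break returning the current count
def pvOuter (cs : List Char) (i : Nat) (count : Int) : Int :=
  if i + 3 < cs.length then
    let j := pvFindJ cs (cs.getD i ' ') (i + 3)
    if j = cs.length then count
    else pvOuter cs (i + 1) (pvL1Loop cs i (j - 1) count)
  else count
termination_by cs.length - i

def shortPalindrome (s : String) : Int :=
  PySem.Int.mod (pvOuter s.toList 0 0) 1000000007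

-- ===== PORT B =====
-- total += cnt.get(c, 0) ; cnt[c] = cnt.get(c, 0) + 1
def pvStep (st : Int × PySem.Dict Char Int) (c : Char) : Int × PySem.Dict Char Int :=
  (st.1 + st.2.getD c 0, st.2.insert c (st.2.getD c 0 + 1))

-- for i in range(n - 3): j = s.find(s[i], i + 3); if j < 0: break; counter pass over s[i+1:j]
def pvBOuter (cs : List Char) (i : Nat) (total : Int) : Int :=
  if i + 3 < cs.length then
    let j := PySem.Chars.findFrom cs [cs.getD i ' '] ((i : Int) + 3)
    if j < 0 then total
    else pvBOuter cs (i + 1)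
      ((PySem.List.slice cs (some ((i : Int) + 1)) (some j)).foldl pvStep
        (total, PySem.Dict.empty)).1
  else total
termination_by cs.length - i

def shortPalindrome_alt (s : String) : Int :=
  PySem.Int.mod (pvBOuter s.toList 0 0) 1000000007

-- ===== PRECONDITION & SPEC =====
def Spec_shortPalindrome (s : String) (out : Int) : Prop := out = shortPalindrome_alt s
instance (s : String) (out : Int) : Decidable (Spec_shortPalindrome s out) := by unfold Spec_shortPalindrome; infer_instance

-- ===== CLAIM (what is proved, stated in full; the proofs are below) =====
def Claim_equal_shortPalindrome : Prop := ∀ (s : String), Dom_shortPalindrome s → Spec_shortPalindrome s (shortPalindrome s)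

-- ===== LEMMAS AND PROOFS =====

-- [c] is a prefix of cs.drop m iff position m holds c
theorem pvSingle_prefix_drop (cs : List Char) (c : Char) (m : Nat) :
    ([c] <+: cs.drop m) ↔ (m < cs.length ∧ cs.getD m ' ' = c) := by
  by_cases h : m < cs.length
  · rw [List.drop_eq_getElem_cons h, List.cons_prefix_cons]
    simp [List.getD, eq_comm, h]
  · rw [List.drop_eq_nil_iff.mpr (by omega)]
    simp [h]

-- full characterisation of A's first-match scan
theorem pvFindJ_spec (cs : List Char) (c : Char) (k : Nat) (hk : k ≤ cs.length) :
    k ≤ pvFindJ cs c k ∧ pvFindJ cs c k ≤ cs.length ∧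
      (pvFindJ cs c k < cs.length → cs.getD (pvFindJ cs c k) ' ' = c) ∧
      (∀ m, k ≤ m → m < pvFindJ cs c k → cs.getD m ' ' ≠ c) := by
  fun_induction pvFindJ cs c k with
  | case1 j hlt hne ih =>
    obtain ⟨h1, h2, h3, h4⟩ := ih (by omega)
    refine ⟨by omega, h2, h3, ?_⟩
    intro m hm1 hm2
    rcases Nat.eq_or_lt_of_le hm1 with rfl | h
    · exact hne
    · exact h4 m h hm2
  | case2 j hlt hne =>
    push Not at hne
    exact ⟨le_refl _, by omega, fun _ => hne, by omega⟩
  | case3 j hge => exact ⟨le_refl _, by omega, by omega, by omega⟩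

-- B's str.find agrees with A's scan
theorem pvFindFrom_eq (cs : List Char) (c : Char) (k : Nat) (hk : k ≤ cs.length) :
    PySem.Chars.findFrom cs [c] (k : Int) =
      if pvFindJ cs c k = cs.length then -1 else ((pvFindJ cs c k : Nat) : Int) := by
  obtain ⟨h1, h2, h3, h4⟩ := pvFindJ_spec cs c k hk
  by_cases hend : pvFindJ cs c k = cs.length
  · rw [if_pos hend]
    rw [PySem.Chars.findFrom_natCast_eq_neg_one_iff cs [c] k hk]
    rw [List.singleton_infix_iff]
    intro hmem
    obtain ⟨idx, hidx, hval⟩ := List.mem_iff_getElem.mp hmem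
    rw [List.getElem_drop] at hval
    have hlen : idx < cs.length - k := by simpa using hidx
    refine h4 (k + idx) (by omega) (by omega) ?_
    rw [List.getD_eq_getElem _ _ (by omega)]
    exact hval
  · rw [if_neg hend]
    have hlt : pvFindJ cs c k < cs.length := lt_of_le_of_ne h2 hend
    have hinf : PySem.Chars.findFrom cs [c] (k : Int) ≠ -1 := by
      rw [Ne, PySem.Chars.findFrom_natCast_eq_neg_one_iff cs [c] k hk, not_not,
        List.singleton_infix_iff]
      refine List.mem_iff_getElem.mpr ⟨pvFindJ cs c k - k, by simpa using (by omega : pvFindJ cs c k - k < cs.length - k), ?_⟩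
      rw [List.getElem_drop]
      have := h3 hlt
      rw [List.getD_eq_getElem _ _ hlt] at this
      simpa [Nat.add_sub_cancel' h1] using this
    obtain ⟨g1, g2, g3⟩ := PySem.Chars.findFrom_natCast_spec cs [c] k hk hinf
    set f := PySem.Chars.findFrom cs [c] (k : Int) with hf
    have hf0 : 0 ≤ f := le_trans (by exact_mod_cast Int.natCast_nonneg k) g1
    have hkf : k ≤ f.toNat := by omega
    have e1 : ¬ f.toNat < pvFindJ cs c k := by
      intro hc
      have := (pvSingle_prefix_drop cs c f.toNat).mp g2
      exact h4 f.toNat hkf hc this.2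
    have e2 : ¬ pvFindJ cs c k < f.toNat := by
      intro hc
      exact g3 (pvFindJ cs c k) h1 hc ((pvSingle_prefix_drop cs c (pvFindJ cs c k)).mpr ⟨hlt, h3 hlt⟩)
    omega

-- the per-start inner sum of A, as a recursive spec
def pvS (cs : List Char) (a : Nat) : Nat → Nat
  | l1 =>
    if _h : a < l1 then ((cs.drop a).take (l1 - a)).count (cs.getD l1 ' ') + pvS cs a (l1 - 1)
    else 0
termination_by l1 => l1

theorem pvKLoop_eq (cs : List Char) (l1 k : Nat) (count : Int) (hl : l1 ≤ cs.length) :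
    pvKLoop cs l1 k count =
      count + (((cs.drop k).take (l1 - k)).count (cs.getD l1 ' ') : Int) := by
  fun_induction pvKLoop cs l1 k count with
  | case1 k count hlt ih =>
    simp only [dite_eq_ite] at ih
    rw [ih]
    have hk : k < cs.length := by omega
    rw [List.drop_eq_getElem_cons hk, show l1 - k = (l1 - (k+1)) + 1 by omega, List.take_succ_cons,
      List.count_cons, List.getD_eq_getElem _ _ hk]
    simp only [beq_iff_eq]
    split_ifs with h <;> push_cast <;> omega
  | case2 k count hge =>
    rw [show l1 - k = 0 by omega]
    simp

theorem pvL1Loop_eq (cs : List Char) (i l1 : Nat) (count : Int) (hl : l1 ≤ cs.length) :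
    pvL1Loop cs i l1 count = count + (pvS cs (i + 1) l1 : Int) := by
  fun_induction pvL1Loop cs i l1 count with
  | case1 l1 count hlt ih =>
    have hS : pvS cs (i + 1) l1 =
        ((cs.drop (i + 1)).take (l1 - (i + 1))).count (cs.getD l1 ' ') + pvS cs (i + 1) (l1 - 1) := by
      rw [pvS]; rw [dif_pos (by omega : i + 1 < l1)]
    rw [ih (by omega), pvKLoop_eq cs l1 (i+1) count hl, hS]
    push_cast
    ring
  | case2 l1 count hge =>
    rw [pvS, dif_neg (by omega)]
    simp

-- "each new element counted against the already-seen prefix": the spec of B's counter pass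
def pvCp (p w : List Char) : Nat :=
  match w with
  | [] => 0
  | c :: t => p.count c + pvCp (p ++ [c]) t

theorem pvCp_append (c : Char) : ∀ w p, pvCp p (w ++ [c]) = pvCp p w + (p ++ w).count c := by
  intro w
  induction w with
  | nil => intro p; simp [pvCp]
  | cons a t ih =>
    intro p
    simp only [List.cons_append, pvCp, ih (p ++ [a])]
    simp [List.count_append]
    omega

theorem pvFold_cp : ∀ (w : List Char) (p : List Char) (d : PySem.Dict Char Int) (total : Int),
    (∀ c, d.getD c 0 = (p.count c : Int)) →
    (w.foldl pvStep (total, d)).1 = total + (pvCp p w : Int) := by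
  intro w
  induction w with
  | nil => intro p d total h; simp [pvCp]
  | cons c t ih =>
    intro p d total h
    show (t.foldl pvStep (pvStep (total, d) c)).1 = _
    have hinv : ∀ c', ((d.insert c (d.getD c 0 + 1)).getD c' 0) = (((p ++ [c]).count c' : Nat) : Int) := by
      intro c'
      rw [PySem.Dict.getD_insert]
      by_cases hc : c' = c
      · subst hc; rw [if_pos rfl, h, List.count_append]; simp
      · rw [if_neg hc, h, List.count_append]
        have : List.count c' [c] = 0 := by simp [List.count_singleton]; exact fun e => hc e.symm
        simp [this]
    rw [show pvStep (total, d) c = (total + d.getD c 0, d.insert c (d.getD c 0 + 1)) from rfl]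
    rw [ih (p ++ [c]) _ _ hinv, h]
    simp [pvCp]
    ring

theorem pvCp_seg (cs : List Char) (a : Nat) :
    ∀ m, a + m ≤ cs.length → pvCp [] ((cs.drop a).take m) = pvS cs a (a + m - 1) := by
  intro m
  induction m with
  | zero =>
    intro _
    rw [pvS]
    simp [pvCp, dif_neg (by omega : ¬ a < a - 1)]
  | succ m ih =>
    intro hm
    have hidx : a + m < cs.length := by omega
    have hseg : (cs.drop a).take (m + 1) = (cs.drop a).take m ++ [cs.getD (a + m) ' '] := by
      rw [List.take_add_one]
      congr 1
      rw [List.getElem?_drop, List.getElem?_eq_getElem (by omega : a + m < cs.length)]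
      simp [List.getD, List.getElem?_eq_getElem hidx]
    rw [hseg, pvCp_append, ih (by omega)]
    simp only [List.nil_append]
    have hR : pvS cs a (a + m) = if a < a + m then
        ((cs.drop a).take m).count (cs.getD (a + m) ' ') + pvS cs a (a + m - 1) else 0 := by
      rw [pvS]
      by_cases hm0 : a < a + m
      · rw [dif_pos hm0, if_pos hm0, show a + m - a = m by omega]
      · rw [dif_neg hm0, if_neg hm0]
    rw [show a + (m + 1) - 1 = a + m by omega, hR]
    by_cases hm0 : 0 < m
    · rw [if_pos (by omega)]
      omega
    · have hz : m = 0 := by omega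
      subst hz
      rw [if_neg (by omega)]
      have h0 : pvS cs a (a - 1) = 0 := by rw [pvS]; rw [dif_neg (by omega)]
      simpa using h0

theorem pvOuter_eq (cs : List Char) : ∀ i count, pvOuter cs i count = pvBOuter cs i count := by
  intro i count
  fun_induction pvOuter cs i count with
  | case1 i count hlen j hbrk =>
    rw [pvBOuter, if_pos hlen]
    have hcast : ((i : Int) + 3) = ((i + 3 : Nat) : Int) := by push_cast; ring
    rw [hcast, pvFindFrom_eq cs (cs.getD i ' ') (i + 3) (by omega)]
    rw [if_pos hbrk]
    norm_num
  | case2 i count hlen j hbrk ih =>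
    rw [pvBOuter, if_pos hlen]
    have hk3 : i + 3 ≤ cs.length := by omega
    have hcast : ((i : Int) + 3) = ((i + 3 : Nat) : Int) := by push_cast; ring
    rw [hcast, pvFindFrom_eq cs (cs.getD i ' ') (i + 3) hk3, if_neg hbrk]
    obtain ⟨hj1, hj2, hj3, hj4⟩ := pvFindJ_spec cs (cs.getD i ' ') (i + 3) hk3
    have hjlt : pvFindJ cs (cs.getD i ' ') (i + 3) < cs.length := lt_of_le_of_ne hj2 hbrk
    set jA := pvFindJ cs (cs.getD i ' ') (i + 3) with hjA
    rw [if_neg (by omega : ¬ ((jA : Nat) : Int) < 0)]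
    have hcast1 : ((i : Int) + 1) = ((i + 1 : Nat) : Int) := by push_cast; ring
    rw [hcast1, PySem.List.slice_natCast cs (i + 1) jA]
    have hfold : (((cs.drop (i + 1)).take (jA - (i + 1))).foldl pvStep (count, PySem.Dict.empty)).1
        = count + (pvCp [] ((cs.drop (i + 1)).take (jA - (i + 1))) : Int) := by
      exact pvFold_cp _ [] PySem.Dict.empty count
        (fun c => by simp [PySem.Dict.getD, PySem.Dict.get?, PySem.Dict.empty])
    rw [hfold, pvCp_seg cs (i + 1) (jA - (i + 1)) (by omega)]
    rw [show (i + 1) + (jA - (i + 1)) - 1 = jA - 1 by omega]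
    rw [pvL1Loop_eq cs i (jA - 1) count (by omega)] at ih
    rw [← ih]
    rw [pvL1Loop_eq cs i (jA - 1) count (by omega)]
  | case3 i count hlen =>
    rw [pvBOuter, if_neg hlen]

-- ===== VERDICT (by name: the statement is the Claim_ definition above) =====
theorem shortPalindrome_spec : Claim_equal_shortPalindrome := by
  intro s _
  unfold Spec_shortPalindrome shortPalindrome shortPalindrome_alt
  rw [pvOuter_eq]
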